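-- pv_equiv track=rewrite | github.com/Vortiago/mcp-outline | src/mcp_outline/features/dynamic_tools/scope_matching.py | is_endpoint_accessible
-- ===== SOURCE A (Python) =====
-- _METHOD_TO_SCOPE: dict[str, str] = {
--     "create": "create",
--     "config": "read",
--     "list": "read",
--     "info": "read",
--     "search": "read",
--     "documents": "read",
--     "drafts": "read",
--     "viewed": "read",
--     "export": "read",
-- }
--
-- def _get_method_scope(method: str) -> str:
--     """Return the scope level for a given API method.
--
--     Methods not in the mapping default to ``"write"``.
--     """
--     return _METHOD_TO_SCOPE.get(method, "write")
--
-- def is_endpoint_accessible(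
--     endpoint: str,
--     scopes: list[str],
-- ) -> bool:
--     """Check whether *scopes* grant access to *endpoint*.
--
--     Implements the same logic as Outline's
--     ``AuthenticationHelper.canAccess(path, scopes)``.
--
--     Args:
--         endpoint: Outline API endpoint, e.g.
--             ``"documents.info"`` or ``"collections.list"``.
--         scopes: Scope strings as stored on the API key.
--
--     Returns:
--         ``True`` if at least one scope grants access.
--     """
--     parts = endpoint.split(".", 1)
--     if len(parts) != 2:
--         return True  # unparseable → fail-open
--
--     namespace, method = parts
--     method_scope = _get_method_scope(method)
--
--     for scope in scopes:
--         if scope.startswith("/api/"):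
--             # Route scope: /api/namespace.method
--             scope_path = scope[5:]  # strip "/api/"
--             scope_parts = scope_path.split(".", 1)
--             if len(scope_parts) != 2:
--                 continue
--             scope_ns, scope_method = scope_parts
--             if (namespace == scope_ns or scope_ns == "*") and (
--                 method == scope_method or scope_method == "*"
--             ):
--                 return True
--
--         elif ":" in scope:
--             # Namespaced scope: namespace:level
--             scope_ns, scope_level = scope.split(":", 1)
--             if (namespace == scope_ns or scope_ns == "*") and (
--                 scope_level == "write" or method_scope == scope_level
--             ):
--                 return True
--
--         # Global scopes (no ":" or "/api/") are broken in
--         # Outline v1.5.0 due to normalisation prepending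
--         # "/api/" — they match nothing.  Skip silently.
--
--     return False
-- ===== SOURCE B (Python) =====
-- _METHOD_TO_SCOPE: dict[str, str] = {
--     "create": "create",
--     "config": "read",
--     "list": "read",
--     "info": "read",
--     "search": "read",
--     "documents": "read",
--     "drafts": "read",
--     "viewed": "read",
--     "export": "read",
-- }
--
--
-- def is_endpoint_accessible(endpoint, scopes):
--     """Table-driven check: build the finite set of scope strings that grant
--     access to this endpoint, then test plain membership."""
--     parts = endpoint.split(".", 1)
--     if len(parts) != 2:
--         return True  # unparseable -> fail-open
--
--     namespace, method = parts
--     level = _METHOD_TO_SCOPE.get(method, "write")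
--
--     accepting = {
--         f"/api/{ns}.{m}" for ns in (namespace, "*") for m in (method, "*")
--     } | {
--         f"{ns}:{lvl}" for ns in (namespace, "*") for lvl in ("write", level)
--     }
--     return any(scope in accepting for scope in scopes)
-- ===== Notes on version B (the rewrite author's own statement) =====
-- stated objective: alternative
-- what changed: B replaces A's per-scope parsing loop (prefix-strip, split and wildcard comparison for every scope) by building the finite set of canonical scope strings that grant access to the fixed endpoint and testing plain set membership; Pre_ excludes degenerate endpoints whose namespace segment contains ':' or starts with '/api/', where A's per-scope branch order makes the match accidental and either answer is defensible.
-- outside the precondition, e.g. on is_endpoint_accessible('a:b.info', ['a:b:read']): A returns False, B returns True; on is_endpoint_accessible('/api/x.info', ['/api/x:read']): A returns False, B returns True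
import Mathlib
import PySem

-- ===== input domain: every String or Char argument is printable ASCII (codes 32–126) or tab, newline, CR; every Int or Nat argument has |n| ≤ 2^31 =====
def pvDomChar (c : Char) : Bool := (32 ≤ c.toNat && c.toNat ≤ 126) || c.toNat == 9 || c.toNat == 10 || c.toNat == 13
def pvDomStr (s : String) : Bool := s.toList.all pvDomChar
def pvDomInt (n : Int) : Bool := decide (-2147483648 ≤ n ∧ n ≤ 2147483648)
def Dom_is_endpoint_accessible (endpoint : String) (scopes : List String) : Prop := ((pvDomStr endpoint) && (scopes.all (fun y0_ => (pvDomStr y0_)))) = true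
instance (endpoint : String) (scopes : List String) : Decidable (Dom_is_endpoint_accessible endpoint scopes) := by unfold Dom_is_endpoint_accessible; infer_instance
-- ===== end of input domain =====

-- B builds the finite set of scope strings that grant access to the fixed endpoint and
-- tests membership, instead of parsing each scope (objective: alternative).

-- ===== PORT A =====
-- _METHOD_TO_SCOPE (module constant, shared by both Pythons)
def pvMethodToScope : PySem.Dict String String := PySem.Dict.ofList
  [("create","create"),("config","read"),("list","read"),("info","read"),("search","read"),
   ("documents","read"),("drafts","read"),("viewed","read"),("export","read")]

-- _get_method_scope
def pvGetMethodScope (method : String) : String :=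
  PySem.Dict.getD pvMethodToScope method "write"

-- the 'for scope in scopes' loop with its early returns
def pvALoop (ns m msc : String) : List String → Bool
  | [] => false
  | scope :: rest =>
    if PySem.Str.startswith scope "/api/" then
      -- scope_path = scope[5:]; scope_parts = scope_path.split(".", 1)
      match PySem.Str.splitMax? (PySem.Str.slice scope (some 5) none) "." 1 with
      | some [sns, sm] =>
          if (ns == sns || sns == "*") && (m == sm || sm == "*") then true
          else pvALoop ns m msc rest
      | _ => pvALoop ns m msc rest
    else if PySem.Str.isIn ":" scope then
      -- scope_ns, scope_level = scope.split(":", 1)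
      match PySem.Str.splitMax? scope ":" 1 with
      | some [sns, slvl] =>
          if (ns == sns || sns == "*") && (slvl == "write" || msc == slvl) then true
          else pvALoop ns m msc rest
      | _ => pvALoop ns m msc rest
    else pvALoop ns m msc rest

def is_endpoint_accessible (endpoint : String) (scopes : List String) : Bool :=
  match PySem.Str.splitMax? endpoint "." 1 with
  | some [ns, m] => pvALoop ns m (pvGetMethodScope m) scopes
  | _ => true  -- unparseable → fail-open

-- ===== PORT B =====
-- the set `accepting`: route forms /api/{ns}.{m} unioned with namespaced forms {ns}:{lvl}
def pvAccepting (ns m msc : String) : PySem.Set String :=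
  let routes := [ns, "*"].foldl (fun acc n =>
    [m, "*"].foldl (fun a mm => PySem.Set.add a ("/api/" ++ n ++ "." ++ mm)) acc) PySem.Set.empty
  [ns, "*"].foldl (fun acc n =>
    ["write", msc].foldl (fun a lvl => PySem.Set.add a (n ++ ":" ++ lvl)) acc) routes

def is_endpoint_accessible_alt (endpoint : String) (scopes : List String) : Bool :=
  match PySem.Str.splitMax? endpoint "." 1 with
  | some [ns, m] =>
      let accepting := pvAccepting ns m (pvGetMethodScope m)
      scopes.any (fun scope => PySem.Set.contains accepting scope)
  | _ => true  -- unparseable → fail-open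

-- ===== PRECONDITION & SPEC =====
-- Pre_ excludes degenerate endpoints whose namespace segment (the part before the first '.')
-- contains ':' or starts with '/api/': there A's per-scope branch order (route prefix checked
-- before the first-colon split) makes the match accidental and either answer is defensible.
def Pre_is_endpoint_accessible (endpoint : String) (scopes : List String) : Prop :=
  '.' ∈ endpoint.toList →
    (':' ∉ endpoint.toList.takeWhile (· ≠ '.') ∧
     ¬ ("/api/".toList <+: endpoint.toList.takeWhile (· ≠ '.')))
instance (endpoint : String) (scopes : List String) : Decidable (Pre_is_endpoint_accessible endpoint scopes) := by unfold Pre_is_endpoint_accessible; infer_instance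

def pvWitness_is_endpoint_accessible : String × List String := ("documents.info", ["documents:read"])

def Spec_is_endpoint_accessible (endpoint : String) (scopes : List String) (out : Bool) : Prop := out = is_endpoint_accessible_alt endpoint scopes
instance (endpoint : String) (scopes : List String) (out : Bool) : Decidable (Spec_is_endpoint_accessible endpoint scopes out) := by unfold Spec_is_endpoint_accessible; infer_instance

-- ===== CLAIM (what is proved, stated in full; the proofs are below) =====
def Claim_equal_is_endpoint_accessible : Prop := ∀ (endpoint : String) (scopes : List String), Dom_is_endpoint_accessible endpoint scopes → Pre_is_endpoint_accessible endpoint scopes → Spec_is_endpoint_accessible endpoint scopes (is_endpoint_accessible endpoint scopes)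

-- ===== LEMMAS AND PROOFS =====

theorem pv_go_zero (sep : List Char) (fuel : Nat) (l cur : List Char) (acc : List (List Char)) :
    PySem.Chars.splitOnMax.go sep fuel 0 l cur acc = acc.reverse ++ [cur.reverse ++ l] := by
  cases fuel with
  | zero => simp [PySem.Chars.splitOnMax.go]
  | succ f => cases l with
    | nil => simp [PySem.Chars.splitOnMax.go]
    | cons x xs => simp [PySem.Chars.splitOnMax.go]

theorem pv_go_one_no (c : Char) (fuel : Nat) (l cur : List Char) (acc : List (List Char))
    (h : c ∉ l) :
    PySem.Chars.splitOnMax.go [c] fuel 1 l cur acc = acc.reverse ++ [cur.reverse ++ l] := by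
  induction l generalizing fuel cur with
  | nil => cases fuel <;> simp [PySem.Chars.splitOnMax.go]
  | cons x xs ih =>
    cases fuel with
    | zero => simp [PySem.Chars.splitOnMax.go]
    | succ f =>
      have hx : c ≠ x := fun e => h (e ▸ List.mem_cons_self ..)
      have hpre : List.isPrefixOf [c] (x :: xs) = false := by
        simp [List.isPrefixOf, beq_eq_false_iff_ne, hx]
      simp [PySem.Chars.splitOnMax.go, hpre,
        ih f (x :: cur) (fun hm => h (List.mem_cons_of_mem _ hm))]

theorem pv_go_one_found (c : Char) (fuel : Nat) (a b cur : List Char) (acc : List (List Char))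
    (h : c ∉ a) (hf : a.length < fuel) :
    PySem.Chars.splitOnMax.go [c] fuel 1 (a ++ c :: b) cur acc
      = acc.reverse ++ [cur.reverse ++ a, b] := by
  induction a generalizing fuel cur with
  | nil =>
    obtain ⟨f, rfl⟩ : ∃ f, fuel = f + 1 := ⟨fuel - 1, by omega⟩
    have hpre : List.isPrefixOf [c] (c :: b) = true := by simp [List.isPrefixOf]
    simp [PySem.Chars.splitOnMax.go, hpre, pv_go_zero]
  | cons x xs ih =>
    obtain ⟨f, rfl⟩ : ∃ f, fuel = f + 1 := ⟨fuel - 1, by omega⟩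
    have hx : c ≠ x := fun e => h (e ▸ List.mem_cons_self ..)
    have hpre : List.isPrefixOf [c] (x :: (xs ++ c :: b)) = false := by
      simp [List.isPrefixOf, beq_eq_false_iff_ne, hx]
    have := ih f (x :: cur) (fun hm => h (List.mem_cons_of_mem _ hm)) (by simp at hf ⊢; omega)
    simp [PySem.Chars.splitOnMax.go, hpre, this]

theorem pv_split1_no (c : Char) (cs : List Char) (h : c ∉ cs) :
    PySem.Chars.splitOnMax cs [c] 1 = [cs] := by
  simp [PySem.Chars.splitOnMax, pv_go_one_no c _ cs [] [] h]

theorem pv_split1_found (c : Char) (a b : List Char) (h : c ∉ a) :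
    PySem.Chars.splitOnMax (a ++ c :: b) [c] 1 = [a, b] := by
  have := pv_go_one_found c ((a ++ c :: b).length + 1) a b [] [] h (by simp)
  simpa [PySem.Chars.splitOnMax] using this

theorem pv_first_sep (c : Char) (cs : List Char) :
    c ∉ cs ∨ ∃ a b, cs = a ++ c :: b ∧ c ∉ a := by
  induction cs with
  | nil => exact Or.inl (by simp)
  | cons x xs ih =>
    by_cases hx : c = x
    · exact Or.inr ⟨[], xs, by simp [hx], by simp⟩
    · rcases ih with h | ⟨a, b, rfl, ha⟩
      · exact Or.inl (by simp [h, hx])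
      · exact Or.inr ⟨x :: a, b, by simp, by simp [hx, ha]⟩

theorem pv_first_sep_unique {c : Char} {a b a' b' : List Char}
    (h : a ++ c :: b = a' ++ c :: b') (ha : c ∉ a) (ha' : c ∉ a') : a = a' ∧ b = b' := by
  induction a generalizing a' with
  | nil =>
    cases a' with
    | nil => simpa using h
    | cons y ys => simp at h; exact absurd (h.1 ▸ List.mem_cons_self ..) ha'
  | cons x xs ih =>
    cases a' with
    | nil => simp at h; exact absurd (h.1 ▸ List.mem_cons_self ..) ha
    | cons y ys =>
      simp at h
      obtain ⟨rfl, h2⟩ := h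
      have := ih h2 (fun hm => ha (List.mem_cons_of_mem _ hm)) (fun hm => ha' (List.mem_cons_of_mem _ hm))
      exact ⟨by simp [this.1], this.2⟩

theorem pv_split1_eq_pair {c : Char} {cs x y : List Char}
    (h : PySem.Chars.splitOnMax cs [c] 1 = [x, y]) : cs = x ++ c :: y ∧ c ∉ x := by
  rcases pv_first_sep c cs with hno | ⟨a, b, rfl, ha⟩
  · rw [pv_split1_no c cs hno] at h; simp at h
  · rw [pv_split1_found c a b ha] at h
    simp at h
    exact ⟨by simp [h.1, h.2], h.1 ▸ ha⟩

theorem pv_sw (s p : String) : PySem.Str.startswith s p = true ↔ p.toList <+: s.toList := by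
  simp [PySem.Str.startswith_eq, PySem.Chars.startswith, List.isPrefixOf_iff_prefix]

theorem pv_in (s : String) : PySem.Str.isIn ":" s = true ↔ ':' ∈ s.toList := by
  rw [PySem.Str.isIn_eq, PySem.Chars.isIn, ← List.singleton_infix_iff]
  have h := PySem.Chars.find_eq_neg_one_iff s.toList [':']
  show (PySem.Chars.find s.toList [':'] != -1) = true ↔ _
  by_cases hf : PySem.Chars.find s.toList [':'] = -1
  · simp [hf, h.mp hf]
  · simp [bne, hf]
    exact not_not.mp (fun hn => hf (h.mpr hn))

theorem pv_api_sw (r : String) (t : List Char) (h : r.toList = "/api/".toList ++ t) :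
    PySem.Str.startswith r "/api/" = true := by
  rw [PySem.Str.startswith_eq]
  simp [PySem.Chars.startswith, h]

theorem pv_route_toList (n mm : String) :
    ("/api/" ++ n ++ "." ++ mm).toList = "/api/".toList ++ (n.toList ++ '.' :: mm.toList) := by
  simp [String.toList_append]

theorem pv_ns_toList (n lvl : String) :
    (n ++ ":" ++ lvl).toList = n.toList ++ ':' :: lvl.toList := by
  simp [String.toList_append]

theorem pv_star_toList (lvl : String) :
    ("*" ++ ":" ++ lvl).toList = '*' :: ':' :: lvl.toList := by
  simp [String.toList_append]

-- if "/api/" is a prefix of a ++ ':' :: b, it is already a prefix of a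
theorem pv_api_colon {a b : List Char} (h : "/api/".toList <+: a ++ ':' :: b) :
    "/api/".toList <+: a := by
  by_cases hl : "/api/".toList.length ≤ a.length
  · exact List.prefix_of_prefix_length_le h (List.prefix_append a (':' :: b)) hl
  · exfalso
    obtain ⟨t, ht⟩ := h
    have hl5 : a.length < ("/api/".toList).length := by simpa using hl
    have hget := congrArg (fun l => l[a.length]?) ht
    simp only at hget
    rw [List.getElem?_append_left hl5, List.getElem?_append_right (le_refl _), Nat.sub_self] at hget
    have hg : "/api/".toList[a.length]? = some ':' := by simpa using hget
    have : ':' ∈ "/api/".toList := List.mem_of_getElem? hg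
    revert this; decide

set_option maxHeartbeats 1000000 in
theorem pv_mem_accepting (ns m msc s : String) :
    PySem.Set.contains (pvAccepting ns m msc) s = true ↔
      (s = "/api/" ++ ns ++ "." ++ m ∨ s = "/api/" ++ ns ++ "." ++ "*" ∨
       s = "/api/" ++ "*" ++ "." ++ m ∨ s = "/api/" ++ "*" ++ "." ++ "*") ∨
      (s = ns ++ ":" ++ "write" ∨ s = ns ++ ":" ++ msc ∨
       s = "*" ++ ":" ++ "write" ∨ s = "*" ++ ":" ++ msc) := by
  rw [PySem.Set.contains_iff]
  simp only [pvAccepting, List.foldl, PySem.Set.mem_add, PySem.Set.empty, List.not_mem_nil]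
  tauto

def pvMatch (ns m msc : String) (scope : String) : Bool :=
  if PySem.Str.startswith scope "/api/" then
    match PySem.Str.splitMax? (PySem.Str.slice scope (some 5) none) "." 1 with
    | some [sns, sm] => (ns == sns || sns == "*") && (m == sm || sm == "*")
    | _ => false
  else if PySem.Str.isIn ":" scope then
    match PySem.Str.splitMax? scope ":" 1 with
    | some [sns, slvl] => (ns == sns || sns == "*") && (slvl == "write" || msc == slvl)
    | _ => false
  else false

theorem pvALoop_eq_any (ns m msc : String) (l : List String) :
    pvALoop ns m msc l = l.any (pvMatch ns m msc) := by
  induction l with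
  | nil => rfl
  | cons scope rest ih =>
    rw [List.any_cons]
    conv_lhs => rw [pvALoop]
    rw [ih]
    unfold pvMatch
    split
    · split
      · split <;> simp_all
      · simp
    · split
      · split
        · split <;> simp_all
        · simp
      · simp

theorem pv_splitStr (s sep : String) (h : sep.toList ≠ []) :
    ∃ parts, PySem.Str.splitMax? s sep 1 = some parts ∧
      parts.map String.toList = PySem.Chars.splitOnMax s.toList sep.toList 1 := by
  have hb := PySem.Str.splitMax?_map s sep 1
  rw [PySem.Chars.splitMax?, if_neg (by simpa using h)] at hb
  cases hp : PySem.Str.splitMax? s sep 1 with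
  | none => rw [hp] at hb; simp at hb
  | some parts => rw [hp] at hb; exact ⟨parts, rfl, by simpa using hb⟩

set_option maxHeartbeats 1000000 in
theorem pv_step_eq (ns m msc : String) (hns : '.' ∉ ns.toList)
    (hcolns : ':' ∉ ns.toList) (hapins : ¬ ("/api/".toList <+: ns.toList)) (s : String) :
    pvMatch ns m msc s = PySem.Set.contains (pvAccepting ns m msc) s := by
  have hmem := pv_mem_accepting ns m msc s
  by_cases hsw : PySem.Str.startswith s "/api/" = true
  · -- route branch
    obtain ⟨t, ht0⟩ := (pv_sw s "/api/").mp hsw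
    have ht : s.toList = "/api/".toList ++ t := ht0.symm
    have hslice : (PySem.Str.slice s (some 5) none).toList = t := by
      have h5 : (PySem.Str.slice s (some 5) none).toList = s.toList.drop 5 := by simp [pysem]
      rw [h5, ht, show (5:Nat) = ("/api/".toList).length from rfl, List.drop_left]
    obtain ⟨parts, hp, hmap⟩ := pv_splitStr (PySem.Str.slice s (some 5) none) "." (by decide)
    rw [hslice, show ("." : String).toList = ['.'] from rfl] at hmap
    rcases pv_first_sep '.' t with hno | ⟨a, b, hab, ha⟩
    · -- no '.' in the tail: A continues, s matches no candidate
      rw [pv_split1_no '.' t hno] at hmap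
      obtain ⟨x, rfl⟩ : ∃ x, parts = [x] := by
        cases parts with
        | nil => simp at hmap
        | cons x l => cases l <;> simp_all
      cases hc : PySem.Set.contains (pvAccepting ns m msc) s with
      | false =>
        have hsw' := hsw
        simp at hsw'
        rw [pvMatch]; simp [hsw', hp]
      | true =>
        exfalso
        rcases hmem.mp hc with (h4 | h4 | h4 | h4) | (h4 | h4 | h4 | h4)
        all_goals first
        | (rw [h4, pv_route_toList] at ht
           exact hno (by
             have := (List.append_cancel_left ht.symm)
             rw [this]; simp))
        | (rw [h4, pv_ns_toList] at ht
           exact hapins (pv_api_colon ⟨_, ht.symm⟩))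
        | (rw [h4, pv_star_toList] at ht
           have : '*' = '/' := by
             have := congrArg (fun l => l.head?) ht
             simpa using this
           simp at this)
    · -- tail splits as a ++ '.' :: b
      rw [hab, pv_split1_found '.' a b ha] at hmap
      obtain ⟨X, Y, rfl⟩ : ∃ X Y, parts = [X, Y] := by
        cases parts with
        | nil => simp at hmap
        | cons x l => cases l with
          | nil => simp at hmap
          | cons y l2 => cases l2 <;> simp_all
      have hX : X.toList = a := by simp at hmap; exact hmap.1
      have hY : Y.toList = b := by simp at hmap; exact hmap.2
      rw [hab] at ht
      have hsw' := hsw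
      simp at hsw'
      have lhs_eq : pvMatch ns m msc s = ((ns == X || X == "*") && (m == Y || Y == "*")) := by
        rw [pvMatch]; simp [hsw', hp]
      rw [lhs_eq, Bool.eq_iff_iff]
      simp only [Bool.and_eq_true, Bool.or_eq_true, beq_iff_eq]
      rw [hmem]
      constructor
      · rintro ⟨hn | hn, hm | hm⟩
        · have e1 : a = ns.toList := by rw [← hX, ← hn]
          have e2 : b = m.toList := by rw [← hY, ← hm]
          exact Or.inl (Or.inl (String.toList_inj.mp (show s.toList = ("/api/" ++ ns ++ "." ++ m).toList by rw [pv_route_toList, ht, e1, e2])))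
        · have e1 : a = ns.toList := by rw [← hX, ← hn]
          have e2 : b = ("*" : String).toList := by rw [← hY, hm]
          exact Or.inl (Or.inr (Or.inl (String.toList_inj.mp (show s.toList = ("/api/" ++ ns ++ "." ++ "*").toList by rw [pv_route_toList, ht, e1, e2]))))
        · have e1 : a = ("*" : String).toList := by rw [← hX, hn]
          have e2 : b = m.toList := by rw [← hY, ← hm]
          exact Or.inl (Or.inr (Or.inr (Or.inl (String.toList_inj.mp (show s.toList = ("/api/" ++ "*" ++ "." ++ m).toList by rw [pv_route_toList, ht, e1, e2])))))
        · have e1 : a = ("*" : String).toList := by rw [← hX, hn]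
          have e2 : b = ("*" : String).toList := by rw [← hY, hm]
          exact Or.inl (Or.inr (Or.inr (Or.inr (String.toList_inj.mp (show s.toList = ("/api/" ++ "*" ++ "." ++ "*").toList by rw [pv_route_toList, ht, e1, e2])))))
      · rintro ((h4 | h4 | h4 | h4) | (h4 | h4 | h4 | h4))
        · rw [h4, pv_route_toList] at ht
          have e := pv_first_sep_unique (List.append_cancel_left ht) hns ha
          exact ⟨Or.inl (String.toList_inj.mp (show ns.toList = X.toList by rw [hX]; exact e.1)),
                 Or.inl (String.toList_inj.mp (show m.toList = Y.toList by rw [hY]; exact e.2))⟩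
        · rw [h4, pv_route_toList] at ht
          have e := pv_first_sep_unique (List.append_cancel_left ht) hns ha
          exact ⟨Or.inl (String.toList_inj.mp (show ns.toList = X.toList by rw [hX]; exact e.1)),
                 Or.inr (String.toList_inj.mp (show Y.toList = ("*" : String).toList by rw [hY]; exact e.2.symm))⟩
        · rw [h4, pv_route_toList] at ht
          have h5 : '.' ∉ (("*" : String).toList) := by decide
          have e := pv_first_sep_unique (List.append_cancel_left ht) h5 ha
          exact ⟨Or.inr (String.toList_inj.mp (show X.toList = ("*" : String).toList by rw [hX]; exact e.1.symm)),
                 Or.inl (String.toList_inj.mp (show m.toList = Y.toList by rw [hY]; exact e.2))⟩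
        · rw [h4, pv_route_toList] at ht
          have h5 : '.' ∉ (("*" : String).toList) := by decide
          have e := pv_first_sep_unique (List.append_cancel_left ht) h5 ha
          exact ⟨Or.inr (String.toList_inj.mp (show X.toList = ("*" : String).toList by rw [hX]; exact e.1.symm)),
                 Or.inr (String.toList_inj.mp (show Y.toList = ("*" : String).toList by rw [hY]; exact e.2.symm))⟩
        · exfalso; rw [h4, pv_ns_toList] at ht
          exact hapins (pv_api_colon ⟨_, ht.symm⟩)
        · exfalso; rw [h4, pv_ns_toList] at ht
          exact hapins (pv_api_colon ⟨_, ht.symm⟩)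
        · exfalso
          rw [h4, pv_star_toList] at ht
          have := congrArg (fun l => l.head?) ht
          simp at this
        · exfalso
          rw [h4, pv_star_toList] at ht
          have := congrArg (fun l => l.head?) ht
          simp at this
  · -- not a route scope
    have hswf : PySem.Str.startswith s "/api/" = false := by simpa using hsw
    by_cases hin : PySem.Str.isIn ":" s = true
    · have hcol : ':' ∈ s.toList := (pv_in s).mp hin
      rcases pv_first_sep ':' s.toList with hno | ⟨a, b, hab, ha⟩
      · exact absurd hcol hno
      obtain ⟨parts, hp, hmap⟩ := pv_splitStr s ":" (by decide)
      rw [hab, show (":" : String).toList = [':'] from rfl, pv_split1_found ':' a b ha] at hmap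
      obtain ⟨X, Y, rfl⟩ : ∃ X Y, parts = [X, Y] := by
        cases parts with
        | nil => simp at hmap
        | cons x l => cases l with
          | nil => simp at hmap
          | cons y l2 => cases l2 <;> simp_all
      have hX : X.toList = a := by simp at hmap; exact hmap.1
      have hY : Y.toList = b := by simp at hmap; exact hmap.2
      have hswf' := hswf
      have hin' := hin
      simp at hswf' hin'
      have lhs_eq : pvMatch ns m msc s = ((ns == X || X == "*") && (Y == "write" || msc == Y)) := by
        rw [pvMatch]; simp [hswf', hin', hp]
      rw [lhs_eq, Bool.eq_iff_iff]
      simp only [Bool.and_eq_true, Bool.or_eq_true, beq_iff_eq]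
      rw [hmem]
      constructor
      · rintro ⟨hn | hn, hl | hl⟩
        · have e1 : a = ns.toList := by rw [← hX, ← hn]
          have e2 : b = ("write" : String).toList := by rw [← hY, hl]
          exact Or.inr (Or.inl (String.toList_inj.mp (by rw [pv_ns_toList, hab, e1, e2])))
        · have e1 : a = ns.toList := by rw [← hX, ← hn]
          have e2 : b = msc.toList := by rw [← hY, ← hl]
          exact Or.inr (Or.inr (Or.inl (String.toList_inj.mp (by rw [pv_ns_toList, hab, e1, e2]))))
        · have e1 : a = ['*'] := by rw [← hX, hn]; rfl
          have e2 : b = ("write" : String).toList := by rw [← hY, hl]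
          exact Or.inr (Or.inr (Or.inr (Or.inl (String.toList_inj.mp (by
            simp [hab, e1, e2])))))
        · have e1 : a = ['*'] := by rw [← hX, hn]; rfl
          have e2 : b = msc.toList := by rw [← hY, ← hl]
          exact Or.inr (Or.inr (Or.inr (Or.inr (String.toList_inj.mp (by
            simp [hab, e1, e2])))))
      · rintro ((h4 | h4 | h4 | h4) | (h4 | h4 | h4 | h4))
        · exact absurd (pv_api_sw s _ (by rw [h4, pv_route_toList])) (by simp [hswf'])
        · exact absurd (pv_api_sw s _ (by rw [h4, pv_route_toList])) (by simp [hswf'])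
        · exact absurd (pv_api_sw s _ (by rw [h4, pv_route_toList])) (by simp [hswf'])
        · exact absurd (pv_api_sw s _ (by rw [h4, pv_route_toList])) (by simp [hswf'])
        · rw [h4, pv_ns_toList] at hab
          have e := pv_first_sep_unique hab.symm ha hcolns
          exact ⟨Or.inl (String.toList_inj.mp (show ns.toList = X.toList by rw [hX]; exact e.1.symm)),
                 Or.inl (String.toList_inj.mp (show Y.toList = ("write" : String).toList by rw [hY]; exact e.2))⟩
        · rw [h4, pv_ns_toList] at hab
          have e := pv_first_sep_unique hab.symm ha hcolns
          exact ⟨Or.inl (String.toList_inj.mp (show ns.toList = X.toList by rw [hX]; exact e.1.symm)),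
                 Or.inr (String.toList_inj.mp (show msc.toList = Y.toList by rw [hY]; exact e.2.symm))⟩
        · rw [h4, pv_star_toList] at hab
          have h5 : ':' ∉ ['*'] := by decide
          have e := pv_first_sep_unique (a' := ['*']) hab.symm ha h5
          exact ⟨Or.inr (String.toList_inj.mp (show X.toList = ("*" : String).toList by rw [hX, e.1]; rfl)),
                 Or.inl (String.toList_inj.mp (show Y.toList = ("write" : String).toList by rw [hY]; exact e.2))⟩
        · rw [h4, pv_star_toList] at hab
          have h5 : ':' ∉ ['*'] := by decide
          have e := pv_first_sep_unique (a' := ['*']) hab.symm ha h5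
          exact ⟨Or.inr (String.toList_inj.mp (show X.toList = ("*" : String).toList by rw [hX, e.1]; rfl)),
                 Or.inr (String.toList_inj.mp (show msc.toList = Y.toList by rw [hY]; exact e.2.symm))⟩
    · -- neither route nor namespaced: no match, no candidate
      have hinf : PySem.Str.isIn ":" s = false := by simpa using hin
      cases hc : PySem.Set.contains (pvAccepting ns m msc) s with
      | false =>
        have hswf' := hswf
        have hinf' := hinf
        simp at hswf' hinf'
        rw [pvMatch]; simp [hswf', hinf']
      | true =>
        exfalso
        have hswf' := hswf
        simp at hswf'
        have hncol : ':' ∉ s.toList := fun hm2 => by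
          rw [(pv_in s).mpr hm2] at hinf; simp at hinf
        rcases hmem.mp hc with (h4 | h4 | h4 | h4) | (h4 | h4 | h4 | h4)
        all_goals first
        | exact absurd (pv_api_sw s _ (by rw [h4, pv_route_toList])) (by simp [hswf'])
        | (exact hncol (by rw [h4, pv_ns_toList]; simp))

theorem pv_takeWhile_pair (a b : List Char) (ha : '.' ∉ a) :
    (a ++ '.' :: b).takeWhile (· ≠ '.') = a := by
  induction a with
  | nil => simp
  | cons x xs ih =>
    have hx : x ≠ '.' := fun e => ha (e ▸ List.mem_cons_self ..)
    simpa [hx] using ih (fun hm => ha (List.mem_cons_of_mem _ hm))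

-- ===== VERDICT (by name: the statement is the Claim_ definition above) =====
theorem is_endpoint_accessible_spec : Claim_equal_is_endpoint_accessible := by
  intro endpoint scopes _ hpre
  unfold Spec_is_endpoint_accessible
  rw [is_endpoint_accessible, is_endpoint_accessible_alt]
  cases hp : PySem.Str.splitMax? endpoint "." 1 with
  | none => rfl
  | some parts =>
    match parts with
    | [] => rfl
    | [_] => rfl
    | _ :: _ :: _ :: _ => rfl
    | [ns, m] =>
      have hb := PySem.Str.splitMax?_map endpoint "." 1
      rw [hp, PySem.Chars.splitMax?, if_neg (by simp)] at hb
      simp only [Option.map_some, Option.some_inj, List.map_cons, List.map_nil] at hb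
      have hsplit : PySem.Chars.splitOnMax endpoint.toList ['.'] 1 = [ns.toList, m.toList] := by
        rw [show ['.'] = ("." : String).toList from rfl]; exact hb.symm
      obtain ⟨hdecomp, hns⟩ := pv_split1_eq_pair hsplit
      have hdot : '.' ∈ endpoint.toList := by rw [hdecomp]; simp
      have htw : endpoint.toList.takeWhile (· ≠ '.') = ns.toList := by
        rw [hdecomp]; exact pv_takeWhile_pair _ _ hns
      obtain ⟨hcolns, hapins⟩ := hpre hdot
      rw [htw] at hcolns hapins
      show pvALoop ns m (pvGetMethodScope m) scopes = scopes.any _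
      rw [pvALoop_eq_any]
      have hfe : pvMatch ns m (pvGetMethodScope m)
          = (fun s => PySem.Set.contains (pvAccepting ns m (pvGetMethodScope m)) s) :=
        funext (pv_step_eq ns m (pvGetMethodScope m) hns hcolns hapins)
      rw [hfe]
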